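-- pv_equiv track=rewrite | github.com/ssato/python-myrepo | myrepo/cli.py | _degenerate_dists_g
-- ===== SOURCE A (Python) =====
-- from itertools import groupby
-- from operator import itemgetter
--
-- def _degenerate_dists_g(dists):
--     """
--     Degenerate dists by bdist. (It is needed to avoid building noarch srpms
--     multiple times.)
--
--     >>> d0 = ('fedora', '16', 'x86_64', 'fedora-16')
--     >>> d1 = ('fedora', '16', 'i386', 'fedora-16')
--     >>> d2 = ('rhel', '6', 'x86_64', 'rhel-6')
--
--     >>> list(_degenerate_dists_g([d0, d1]))
--     [('fedora', '16', ['x86_64', 'i386'], 'fedora-16')]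
--
--     >>> ds2 = [
--     ...    ('fedora', '16', ['x86_64', 'i386'], 'fedora-16'),
--     ...    ('rhel', '6', ['x86_64'], 'rhel-6')
--     ... ]
--     >>> list(_degenerate_dists_g([d0, d1, d2])) == ds2
--     True
--     """
--     key_f = itemgetter(3)  # to extract bdist from dist.
--     bds = [(bdist, list(ds)) for bdist, ds in groupby(dists, key_f)]
--
--     for bd in bds:
--         bdist = bd[0]
--         dists = bd[1]
--
--         dist0 = dists[0]
--         archs = [d[2] for d in dists]
--
--         (dname, dver) = dist0[:2]
--
--         yield (dname, dver, archs, bdist)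
-- ===== SOURCE B (Python) =====
-- def _degenerate_dists_g(dists):
--     # Build the result back-to-front: walk dists in reverse, keeping the list of
--     # groups already built for the suffix. Each dist either merges into the
--     # front group (same bdist: prepend its arch and take over dname/dver, so the
--     # group's name/version end up coming from its first element) or opens a new
--     # front group. Finally yield the groups in order.
--     groups = []
--     for d in reversed(dists):
--         if groups and groups[0][3] == d[3]:
--             g = groups[0]
--             groups[0] = (d[0], d[1], [d[2]] + g[2], d[3])
--         else:
--             groups.insert(0, (d[0], d[1], [d[2]], d[3]))
--     yield from groups
-- ===== Notes on version B (the rewrite author's own statement) =====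
-- stated objective: alternative
-- what changed: Instead of groupby-then-loop, B constructs the output back-to-front: a reverse traversal that either merges each dist into the front group of the suffix result (same bdist) or prepends a fresh group.
import Mathlib
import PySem

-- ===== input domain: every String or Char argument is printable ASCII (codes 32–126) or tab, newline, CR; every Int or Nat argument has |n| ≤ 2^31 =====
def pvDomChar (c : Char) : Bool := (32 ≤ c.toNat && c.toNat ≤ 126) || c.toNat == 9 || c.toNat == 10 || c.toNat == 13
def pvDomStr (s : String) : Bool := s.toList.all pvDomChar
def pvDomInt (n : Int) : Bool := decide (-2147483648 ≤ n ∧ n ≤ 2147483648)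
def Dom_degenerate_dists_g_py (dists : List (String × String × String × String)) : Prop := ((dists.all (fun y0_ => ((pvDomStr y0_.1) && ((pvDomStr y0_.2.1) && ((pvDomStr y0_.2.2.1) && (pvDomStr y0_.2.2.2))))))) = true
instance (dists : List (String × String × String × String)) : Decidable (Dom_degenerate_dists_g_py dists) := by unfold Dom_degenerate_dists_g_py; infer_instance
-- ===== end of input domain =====

-- B builds the output back-to-front by a reverse traversal that merges into (or prepends to) the
-- front group of the suffix's result, instead of A's groupby + second loop (objective: alternative).
-- ===== PORT A =====
-- itertools.groupby(dists, itemgetter(3)): consecutive runs of equal bdist, each group materialised as a list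
def pvGroupBy3 : List (String × String × String × String) → List (String × List (String × String × String × String))
  | [] => []
  | d :: rest =>
    let k := d.2.2.2
    (k, d :: rest.takeWhile (fun e => e.2.2.2 == k)) ::
      pvGroupBy3 (rest.dropWhile (fun e => e.2.2.2 == k))
termination_by l => l.length
decreasing_by
  exact Nat.lt_succ_of_le (List.length_dropWhile_le _ _)

def degenerate_dists_g_py (dists : List (String × String × String × String)) : List (String × String × List String × String) :=
  let bds := pvGroupBy3 dists
  bds.map (fun bd =>
    let bdist := bd.1
    let ds := bd.2
    match ds with
    | [] => ("", "", [], bdist)  -- unreachable: groupby groups are nonempty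
    | dist0 :: _ =>
      let archs := ds.map (fun d => d.2.2.1)
      (dist0.1, dist0.2.1, archs, bdist))

-- ===== PORT B =====
-- one step of Source B's reverse loop body: merge d into the front group or open a new one
def pvStepB (d : String × String × String × String)
    (groups : List (String × String × List String × String)) :
    List (String × String × List String × String) :=
  match groups with
  | (_, _, ar, b) :: rest =>
    if b == d.2.2.2 then (d.1, d.2.1, d.2.2.1 :: ar, d.2.2.2) :: rest
    else (d.1, d.2.1, [d.2.2.1], d.2.2.2) :: groups
  | [] => [(d.1, d.2.1, [d.2.2.1], d.2.2.2)]

-- 'for d in reversed(dists): groups = step' with an initially empty groups = right fold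
def degenerate_dists_g_py_alt (dists : List (String × String × String × String)) : List (String × String × List String × String) :=
  dists.foldr pvStepB []

-- ===== PRECONDITION & SPEC =====
def Spec_degenerate_dists_g_py (dists : List (String × String × String × String)) (out : List (String × String × List String × String)) : Prop := out = degenerate_dists_g_py_alt dists
instance (dists : List (String × String × String × String)) (out : List (String × String × List String × String)) : Decidable (Spec_degenerate_dists_g_py dists out) := by unfold Spec_degenerate_dists_g_py; infer_instance

-- ===== CLAIM (what is proved, stated in full; the proofs are below) =====
def Claim_equal_degenerate_dists_g_py : Prop := ∀ (dists : List (String × String × String × String)), Dom_degenerate_dists_g_py dists → Spec_degenerate_dists_g_py dists (degenerate_dists_g_py dists)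

-- ===== LEMMAS AND PROOFS =====

theorem pv_alt_cons (d : String × String × String × String)
    (l : List (String × String × String × String)) :
    degenerate_dists_g_py_alt (d :: l) =
      (d.1, d.2.1, d.2.2.1 :: (l.takeWhile (fun e => e.2.2.2 == d.2.2.2)).map (fun e => e.2.2.1), d.2.2.2)
        :: degenerate_dists_g_py_alt (l.dropWhile (fun e => e.2.2.2 == d.2.2.2)) := by
  induction l generalizing d with
  | nil => simp [degenerate_dists_g_py_alt, pvStepB]
  | cons e l ih =>
    by_cases h : e.2.2.2 = d.2.2.2
    · have : degenerate_dists_g_py_alt (d :: e :: l) = pvStepB d (degenerate_dists_g_py_alt (e :: l)) := rfl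
      rw [this, ih e]
      simp [pvStepB, h, List.takeWhile, List.dropWhile]
    · have hb : (e.2.2.2 == d.2.2.2) = false := by simp [h]
      have h1 : degenerate_dists_g_py_alt (d :: e :: l) = pvStepB d (degenerate_dists_g_py_alt (e :: l)) := rfl
      have h2 : (e :: l).takeWhile (fun x => x.2.2.2 == d.2.2.2) = [] := by simp [hb]
      have h3 : (e :: l).dropWhile (fun x => x.2.2.2 == d.2.2.2) = e :: l := by simp [hb]
      rw [h1, h2, h3, ih e]
      simp [pvStepB, hb]

theorem pv_main (dists : List (String × String × String × String)) :
    degenerate_dists_g_py dists = degenerate_dists_g_py_alt dists := by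
  induction dists using pvGroupBy3.induct with
  | case1 => simp [degenerate_dists_g_py, pvGroupBy3, degenerate_dists_g_py_alt]
  | case2 d rest k ih =>
    have hA : degenerate_dists_g_py (d :: rest) =
        (d.1, d.2.1, d.2.2.1 :: (rest.takeWhile (fun e => e.2.2.2 == d.2.2.2)).map (fun e => e.2.2.1), d.2.2.2)
          :: degenerate_dists_g_py (rest.dropWhile (fun e => e.2.2.2 == d.2.2.2)) := by
      simp [degenerate_dists_g_py, pvGroupBy3]
    rw [hA, ih, pv_alt_cons]

-- ===== VERDICT (by name: the statement is the Claim_ definition above) =====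
theorem degenerate_dists_g_py_spec : Claim_equal_degenerate_dists_g_py := by
  intro dists _
  unfold Spec_degenerate_dists_g_py
  exact pv_main dists
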